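-- pv_equiv track=rewrite | github.com/rcharp/parser | app/blueprints/parse/parse.py | line_numbers_parse
-- ===== SOURCE A (Python) =====
-- def line_numbers_parse(item, args):
--     results = []
--     for arg in args:
--         count = 1
--         for line in item.split('\n'):
--             if str(count) == arg.strip():
--                 results.append(line)
--             count += 1
--
--     results = list(set(results))
--     return results
-- ===== SOURCE B (Python) =====
-- def line_numbers_parse(item, args):
--     lines = item.split('\n')
--     index = {}
--     for i, line in enumerate(lines, 1):
--         index[str(i)] = line
--     results = []
--     for arg in args:
--         line = index.get(arg.strip())
--         if line is not None:
--             results.append(line)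
--     return list(set(results))
-- ===== Notes on version B (the rewrite author's own statement) =====
-- stated objective: faster
-- what changed: B splits the text once and builds a line-number->line index dict up front, then answers each arg by a single O(1) lookup, replacing A's full rescan of all lines (with str(count) recomputed per line) for every arg.
import Mathlib
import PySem

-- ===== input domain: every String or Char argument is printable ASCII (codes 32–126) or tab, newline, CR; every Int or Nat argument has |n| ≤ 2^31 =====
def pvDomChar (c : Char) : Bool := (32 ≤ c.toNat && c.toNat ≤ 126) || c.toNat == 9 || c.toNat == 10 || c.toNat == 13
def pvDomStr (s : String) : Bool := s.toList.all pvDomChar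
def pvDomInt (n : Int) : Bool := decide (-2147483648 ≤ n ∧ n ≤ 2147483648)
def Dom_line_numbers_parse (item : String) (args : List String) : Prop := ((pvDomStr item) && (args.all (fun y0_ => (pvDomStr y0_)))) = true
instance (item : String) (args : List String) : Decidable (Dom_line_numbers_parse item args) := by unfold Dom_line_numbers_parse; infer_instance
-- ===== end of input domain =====

-- B replaces A's per-arg rescan of all lines by a dict index from line-number strings to
-- lines built once, answering each arg with one lookup (asymptotically faster).
-- Python's `list(set(results))` iterates a set in hash order; both programs build the set from
-- the SAME results list, so they return identical lists; in Lean it is modelled on both sides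
-- as PySem.Set.ofList (first-occurrence order), exact as a set.

-- ===== PORT A =====
def line_numbers_parse (item : String) (args : List String) : List String :=
  -- results = []; for arg in args: count = 1; for line in item.split('\n'): ...
  let results := args.foldl
    (fun results arg =>
      (((PySem.Str.split? item "\n").getD []).foldl
        (fun (st : List String × Int) line =>
          (if PySem.Int.toStr st.2 == PySem.Str.strip arg then st.1 ++ [line] else st.1,
           st.2 + 1))
        (results, (1 : Int))).1)
    []
  PySem.Set.ofList results  -- results = list(set(results))

-- ===== PORT B =====
def line_numbers_parse_alt (item : String) (args : List String) : List String :=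
  let lines := (PySem.Str.split? item "\n").getD []
  -- index = {}; for i, line in enumerate(lines, 1): index[str(i)] = line
  let index : PySem.Dict String String :=
    (PySem.List.enumerate lines 1).foldl
      (fun d p => d.insert (PySem.Int.toStr p.1) p.2) PySem.Dict.empty
  -- results = []; for arg in args: line = index.get(arg.strip()); if line is not None: append
  let results := args.foldl
    (fun results arg =>
      match index.get? (PySem.Str.strip arg) with
      | some line => results ++ [line]
      | none => results)
    []
  PySem.Set.ofList results  -- list(set(results))

-- ===== PRECONDITION & SPEC =====
def Spec_line_numbers_parse (item : String) (args : List String) (out : List String) : Prop := out = line_numbers_parse_alt item args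
instance (item : String) (args : List String) (out : List String) : Decidable (Spec_line_numbers_parse item args out) := by unfold Spec_line_numbers_parse; infer_instance

-- ===== CLAIM (what is proved, stated in full; the proofs are below) =====
def Claim_equal_line_numbers_parse : Prop := ∀ (item : String) (args : List String), Dom_line_numbers_parse item args → Spec_line_numbers_parse item args (line_numbers_parse item args)

-- ===== LEMMAS AND PROOFS =====

-- pvMatchL key ls c: the lines A's inner loop collects for one arg whose stripped form is
-- `key`, scanning ls with the counter starting at c.
def pvMatchL (key : String) : List String → Int → List String
  | [], _ => []
  | l :: ls, c => (if PySem.Int.toStr c == key then [l] else []) ++ pvMatchL key ls (c + 1)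

def pvVal (cs : List Char) : Nat := cs.foldl (fun a c => a * 10 + (c.toNat - 48)) 0

lemma pv_toDigitsCore_shift : ∀ (f n : Nat) (ds : List Char),
    Nat.toDigitsCore 10 f n ds = Nat.toDigitsCore 10 f n [] ++ ds := by
  intro f
  induction f with
  | zero => intro n ds; simp [Nat.toDigitsCore]
  | succ f ih =>
    intro n ds
    simp only [Nat.toDigitsCore]
    by_cases h : n / 10 = 0
    · simp [h]
    · simp only [h, if_false]
      rw [ih (n / 10) (Nat.digitChar (n % 10) :: ds), ih (n / 10) [Nat.digitChar (n % 10)]]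
      simp

lemma pv_digitChar_val : ∀ d : Nat, d < 10 → (Nat.digitChar d).toNat - 48 = d := by decide

lemma pv_core_val : ∀ (f n : Nat), n < 10 ^ f → pvVal (Nat.toDigitsCore 10 f n []) = n := by
  intro f
  induction f with
  | zero => intro n h; interval_cases n; simp [Nat.toDigitsCore, pvVal]
  | succ f ih =>
    intro n h
    simp only [Nat.toDigitsCore]
    by_cases h0 : n / 10 = 0
    · have hn : n < 10 := by omega
      simp [h0, pvVal, Nat.mod_eq_of_lt hn]
      exact pv_digitChar_val n hn
    · simp only [h0, if_false]
      rw [pv_toDigitsCore_shift]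
      have hdiv : n / 10 < 10 ^ f := by
        rw [pow_succ] at h; omega
      have := ih (n / 10) hdiv
      simp [pvVal, List.foldl_append] at this ⊢
      rw [show (Nat.toDigitsCore 10 f (n / 10) []).foldl (fun a c => a * 10 + (c.toNat - 48)) 0 = n / 10 from this]
      rw [pv_digitChar_val (n % 10) (Nat.mod_lt _ (by norm_num))]
      omega

lemma pv_toDigits_val (n : Nat) : pvVal (Nat.toDigits 10 n) = n := by
  have hn : n < 10 ^ (n + 1) := by
    calc n < 10 ^ n := Nat.lt_pow_self (by norm_num)
    _ ≤ 10 ^ (n + 1) := Nat.pow_le_pow_right (by norm_num) (Nat.le_succ n)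
  exact pv_core_val (n + 1) n hn

lemma pv_toStr_inj {a b : Int} (ha : 0 ≤ a) (hb : 0 ≤ b)
    (h : PySem.Int.toStr a = PySem.Int.toStr b) : a = b := by
  have h2 : PySem.Int.toChars a = PySem.Int.toChars b := by
    rw [← PySem.Int.toList_toStr, ← PySem.Int.toList_toStr, h]
  unfold PySem.Int.toChars at h2
  rw [if_neg (by omega), if_neg (by omega)] at h2
  have h3 : pvVal (Nat.toDigits 10 a.toNat) = pvVal (Nat.toDigits 10 b.toNat) := by rw [h2]
  rw [pv_toDigits_val, pv_toDigits_val] at h3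
  omega

lemma pv_matchL_nil_of_lt (c : Int) (hc : 0 ≤ c) :
    ∀ (ls : List String) (c' : Int), c < c' → pvMatchL (PySem.Int.toStr c) ls c' = [] := by
  intro ls
  induction ls with
  | nil => intro c' _; rfl
  | cons l ls ih =>
    intro c' hlt
    have hne : (PySem.Int.toStr c' == PySem.Int.toStr c) = false := by
      by_contra hcon
      have : PySem.Int.toStr c' = PySem.Int.toStr c := by
        simpa [beq_iff_eq] using hcon
      have := pv_toStr_inj (by omega) hc this
      omega
    simp only [pvMatchL, hne]
    exact ih (c' + 1) (by omega)

lemma pv_matchL_short (key : String) :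
    ∀ (ls : List String) (c : Int), 1 ≤ c →
      pvMatchL key ls c = [] ∨ ∃ l, pvMatchL key ls c = [l] := by
  intro ls
  induction ls with
  | nil => intro c _; exact Or.inl rfl
  | cons l ls ih =>
    intro c hc
    by_cases h : PySem.Int.toStr c == key
    · right
      refine ⟨l, ?_⟩
      have hkey : key = PySem.Int.toStr c := by
        have h2 : PySem.Int.toStr c = key := by simpa using h
        exact h2.symm
      simp only [pvMatchL, h, if_true, List.singleton_append]
      rw [hkey, pv_matchL_nil_of_lt c (by omega) ls (c + 1) (by omega)]
    · have hf : (PySem.Int.toStr c == key) = false := by simpa using h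
      simp only [pvMatchL, hf]
      simpa using ih (c + 1) (by omega)

lemma pv_innerA (key : String) :
    ∀ (ls : List String) (res : List String) (c : Int),
      (ls.foldl
        (fun (st : List String × Int) line =>
          (if PySem.Int.toStr st.2 == key then st.1 ++ [line] else st.1, st.2 + 1))
        (res, c)).1 = res ++ pvMatchL key ls c := by
  intro ls
  induction ls with
  | nil => intro res c; simp [pvMatchL]
  | cons l ls ih =>
    intro res c
    by_cases h : PySem.Int.toStr c == key
    · simp only [List.foldl_cons, h, if_true]
      rw [ih (res ++ [l]) (c + 1)]
      simp [pvMatchL, h]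
    · have hf : (PySem.Int.toStr c == key) = false := by simpa using h
      simp only [List.foldl_cons, hf, Bool.false_eq_true, if_false]
      rw [ih res (c + 1)]
      simp [pvMatchL, hf]

lemma pv_dictB (key : String) :
    ∀ (ls : List String) (c : Int) (d : PySem.Dict String String),
      ((PySem.List.enumerate ls c).foldl
          (fun d p => d.insert (PySem.Int.toStr p.1) p.2) d).get? key
        = (pvMatchL key ls c).foldl (fun _ l => some l) (d.get? key) := by
  intro ls
  induction ls with
  | nil => intro c d; simp [PySem.List.enumerate, pvMatchL]
  | cons l ls ih =>
    intro c d
    have hen : PySem.List.enumerate (l :: ls) c = (c, l) :: PySem.List.enumerate ls (c + 1) := by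
      simp [PySem.List.enumerate]
    rw [hen]
    simp only [List.foldl_cons]
    rw [ih (c + 1) (d.insert (PySem.Int.toStr c) l)]
    by_cases h : PySem.Int.toStr c == key
    · have hk : key = PySem.Int.toStr c := by
        have h2 : PySem.Int.toStr c = key := by simpa using h
        exact h2.symm
      simp only [pvMatchL, h, if_true, List.singleton_append, List.foldl_cons]
      rw [PySem.Dict.get?_insert, if_pos hk]
    · have hne : key ≠ PySem.Int.toStr c := fun hk => h (by simp [hk])
      have hf : (PySem.Int.toStr c == key) = false := by simpa using h
      simp only [pvMatchL, hf, Bool.false_eq_true, if_false, List.nil_append]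
      rw [PySem.Dict.get?_insert, if_neg hne]

lemma pv_arg_step (lines : List String) (key : String) :
    (match ((PySem.List.enumerate lines 1).foldl
        (fun d p => d.insert (PySem.Int.toStr p.1) p.2) PySem.Dict.empty).get? key with
      | some line => (fun (res : List String) => res ++ [line])
      | none => id)
    = fun res => res ++ pvMatchL key lines 1 := by
  rw [pv_dictB key lines 1 PySem.Dict.empty, PySem.Dict.get?_empty]
  rcases pv_matchL_short key lines 1 (le_refl 1) with h | ⟨l, h⟩ <;> rw [h] <;> funext res <;> simp

lemma pv_outer (lines : List String) :
    ∀ (args : List String) (res : List String),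
      args.foldl
        (fun results arg =>
          (lines.foldl
            (fun (st : List String × Int) line =>
              (if PySem.Int.toStr st.2 == PySem.Str.strip arg then st.1 ++ [line] else st.1,
               st.2 + 1))
            (results, (1 : Int))).1)
        res
      = args.foldl
        (fun results arg =>
          match ((PySem.List.enumerate lines 1).foldl
              (fun d p => d.insert (PySem.Int.toStr p.1) p.2) PySem.Dict.empty).get?
              (PySem.Str.strip arg) with
          | some line => results ++ [line]
          | none => results)
        res := by
  intro args
  induction args with
  | nil => intro res; rfl
  | cons arg args ih =>
    intro res
    simp only [List.foldl_cons]
    rw [pv_innerA (PySem.Str.strip arg) lines res 1]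
    have h := congrFun (pv_arg_step lines (PySem.Str.strip arg)) res
    simp only at h
    rw [ih]
    congr 1
    rw [← h]
    cases hmatch : ((PySem.List.enumerate lines 1).foldl
        (fun d p => d.insert (PySem.Int.toStr p.1) p.2) PySem.Dict.empty).get?
        (PySem.Str.strip arg) <;> simp

-- ===== VERDICT (by name: the statement is the Claim_ definition above) =====
theorem line_numbers_parse_spec : Claim_equal_line_numbers_parse := by
  intro item args _
  unfold Spec_line_numbers_parse line_numbers_parse line_numbers_parse_alt
  simp only
  rw [pv_outer ((PySem.Str.split? item "\n").getD []) args []]
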